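-- pv_equiv track=rewrite | github.com/xNJL/Creation-of-a-dashboard-analyzing-the-abuse-of-dominance-EU-law-cases | ITlaw_wiki.py | common_keys
-- ===== SOURCE A (Python) =====
-- def common_keys(data):
--     ck = []
--     companies = list(data.keys())
--     tc = len(companies)
--     for a in data[companies[0]]:
--         for i in range(1, tc):
--             if a not in data[companies[i]].keys():
--                 break
--             if i == tc - 1:
--                 ck.append(a)
--     return ck
-- ===== SOURCE B (Python) =====
-- def common_keys(data):
--     companies = list(data)
--     rest = companies[1:]
--     if not rest:
--         return []
--     common = set(data[rest[0]])
--     for c in rest[1:]: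
--         common &= set(data[c])
--     return [k for k in data[companies[0]] if k in common]
-- ===== Notes on version B (the rewrite author's own statement) =====
-- stated objective: idiomatic
-- what changed: replaces A's nested index-loop with break/last-index bookkeeping by a one-shot set intersection over the other dicts followed by a single order-preserving filter of the first dict's keys
import Mathlib
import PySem

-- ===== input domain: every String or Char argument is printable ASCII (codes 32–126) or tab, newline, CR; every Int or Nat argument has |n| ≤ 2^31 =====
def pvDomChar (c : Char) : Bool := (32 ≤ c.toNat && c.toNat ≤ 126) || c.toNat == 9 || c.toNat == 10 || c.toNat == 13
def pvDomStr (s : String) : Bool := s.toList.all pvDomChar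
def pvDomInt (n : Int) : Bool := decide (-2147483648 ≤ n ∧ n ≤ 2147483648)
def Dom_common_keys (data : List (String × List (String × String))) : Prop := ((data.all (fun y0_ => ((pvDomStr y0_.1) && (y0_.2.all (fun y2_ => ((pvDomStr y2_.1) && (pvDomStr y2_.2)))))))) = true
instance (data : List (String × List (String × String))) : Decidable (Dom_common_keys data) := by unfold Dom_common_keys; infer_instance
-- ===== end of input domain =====

-- B replaces A's nested index-loop by one set intersection over the other dicts plus a single
-- order-preserving filter of the first dict's keys (idiomatic; return-value equivalence).

-- ===== PORT A =====
-- inner 'for i in range(1, tc): if a not in data[companies[i]].keys(): break; if i == tc-1: ck.append(a)'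
-- returns true iff the append fires for this `a`
def commonKeysLoopA (d : PySem.Dict String (List (String × String)))
    (companies : List String) (tc : Int) (a : String) : List Int → Bool
  | [] => false
  | i :: rest =>
    if !(PySem.Dict.mk (d.getD (PySem.List.pyGetD companies i "") [])).contains a then false
    else if i == tc - 1 then true
    else commonKeysLoopA d companies tc a rest

def common_keys (data : List (String × List (String × String))) : List String :=
  let d := PySem.Dict.mk data
  let companies := d.keys
  let tc : Int := (companies.length : Int)
  let first := PySem.Dict.mk (d.getD (PySem.List.pyGetD companies 0 "") [])
  first.keys.foldl
    (fun ck a => if commonKeysLoopA d companies tc a (PySem.List.pyRange 1 tc 1) then ck ++ [a] else ck)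
    []

-- ===== PORT B =====
def common_keys_alt (data : List (String × List (String × String))) : List String :=
  let d := PySem.Dict.mk data
  let companies := d.keys
  let rest := PySem.List.slice companies (some 1) none
  match rest with
  | [] => []
  | r0 :: rtail =>
    let common : PySem.Set String :=
      rtail.foldl
        (fun s c => PySem.Set.inter s (PySem.Set.ofList (PySem.Dict.mk (d.getD c [])).keys))
        (PySem.Set.ofList (PySem.Dict.mk (d.getD r0 [])).keys)
    (PySem.Dict.mk (d.getD (PySem.List.pyGetD companies 0 "") [])).keys.filter
      (fun k => PySem.Set.contains common k)

-- ===== PRECONDITION & SPEC =====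
-- A raises IndexError on the empty dict (companies[0]); Pre_ excludes exactly that input.
def Pre_common_keys (data : List (String × List (String × String))) : Prop := data ≠ []
instance (data : List (String × List (String × String))) : Decidable (Pre_common_keys data) := by unfold Pre_common_keys; infer_instance
def pvWitness_common_keys : (List (String × List (String × String))) :=
  [("x", [("a", "1"), ("b", "2")]), ("y", [("a", "3")])]

def Spec_common_keys (data : List (String × List (String × String))) (out : List String) : Prop := out = common_keys_alt data
instance (data : List (String × List (String × String))) (out : List String) : Decidable (Spec_common_keys data out) := by unfold Spec_common_keys; infer_instance

-- ===== CLAIM (what is proved, stated in full; the proofs are below) =====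
def Claim_equal_common_keys : Prop := ∀ (data : List (String × List (String × String))), Dom_common_keys data → Pre_common_keys data → Spec_common_keys data (common_keys data)

-- ===== LEMMAS AND PROOFS =====

-- A's inner loop over indices j..tc-1 succeeds iff the index window is nonempty and `a`
-- is a key of every dict at companies[j..].
theorem commonKeysLoopA_eq (d : PySem.Dict String (List (String × String)))
    (companies : List String) (a : String) :
    ∀ j : Nat, j ≤ companies.length →
      (commonKeysLoopA d companies (companies.length : Int) a
          (PySem.List.pyRange (j : Int) (companies.length : Int) 1) = true ↔
        (j < companies.length ∧ ∀ c ∈ companies.drop j,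
          (PySem.Dict.mk (d.getD c [])).contains a = true)) := by
  intro j hj
  induction hn : companies.length - j generalizing j with
  | zero =>
    have hje : j = companies.length := by omega
    subst hje
    rw [PySem.List.pyRange_one_eq_nil (le_refl _)]
    simp [commonKeysLoopA]
  | succ n ih =>
    have hjlt : j < companies.length := by omega
    rw [PySem.List.pyRange_one_cons (by exact_mod_cast hjlt)]
    have hget : PySem.List.pyGetD companies (j : Int) "" = companies[j] := by
      simp [PySem.List.pyGetD_natCast, List.getD_eq_getElem?_getD,
        List.getElem?_eq_getElem hjlt]
    have hdrop : companies.drop j = companies[j] :: companies.drop (j + 1) :=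
      (List.drop_eq_getElem_cons hjlt)
    simp only [commonKeysLoopA, hget]
    by_cases hc : (PySem.Dict.mk (d.getD companies[j] [])).contains a = true
    · rw [if_neg (by simp [hc])]
      by_cases hlast : (j : Int) = (companies.length : Int) - 1
      · have hje : j + 1 = companies.length := by omega
        rw [if_pos (beq_iff_eq.mpr hlast)]
        constructor
        · intro _
          refine ⟨hjlt, ?_⟩
          rw [hdrop]
          intro c hcmem
          rcases List.mem_cons.mp hcmem with h | h
          · exact h ▸ hc
          · rw [hje] at h; simp at h
        · intro _; rfl
      · have hj1 : j + 1 ≤ companies.length := by omega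
        have hcast : ((j : Int) + 1) = ((j + 1 : Nat) : Int) := by push_cast; ring
        rw [if_neg (by simp [hlast])]
        rw [hcast, ih (j + 1) hj1 (by omega), hdrop]
        constructor
        · rintro ⟨h1, h2⟩
          refine ⟨hjlt, ?_⟩
          intro c hcmem
          rcases List.mem_cons.mp hcmem with h | h
          · exact h ▸ hc
          · exact h2 c h
        · rintro ⟨_, h2⟩
          have hne : j + 1 < companies.length := by omega
          exact ⟨hne, fun c hcmem => h2 c (List.mem_cons.mpr (Or.inr hcmem))⟩
    · rw [if_pos (by simp [hc])]
      constructor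
      · intro h; simp at h
      · rintro ⟨_, h2⟩
        exact absurd (h2 companies[j] (hdrop ▸ List.mem_cons_self)) hc

-- B's intersection fold: membership is membership in the seed and in every later set.
theorem common_fold_contains (d : PySem.Dict String (List (String × String)))
    (a : String) :
    ∀ (rtail : List String) (s : PySem.Set String),
      ((rtail.foldl
          (fun s c => PySem.Set.inter s (PySem.Set.ofList (PySem.Dict.mk (d.getD c [])).keys))
          s).contains a = true ↔
        (a ∈ s ∧ ∀ c ∈ rtail, (PySem.Dict.mk (d.getD c [])).contains a = true)) := by
  intro rtail
  induction rtail with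
  | nil => intro s; simp
  | cons c0 cs ih =>
    intro s
    simp only [List.foldl_cons]
    rw [ih]
    simp only [PySem.Set.mem_inter, PySem.Set.mem_ofList, List.mem_cons]
    constructor
    · rintro ⟨⟨hs, hk⟩, hall⟩
      refine ⟨hs, ?_⟩
      intro c hc
      rcases hc with h | h
      · subst h; rw [PySem.Dict.contains_iff_mem_keys]; exact hk
      · exact hall c h
    · rintro ⟨hs, hall⟩
      refine ⟨⟨hs, ?_⟩, fun c hc => hall c (Or.inr hc)⟩
      rw [← PySem.Dict.contains_iff_mem_keys]
      exact hall c0 (Or.inl rfl)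

theorem common_keys_spec : Claim_equal_common_keys := by
  unfold Claim_equal_common_keys Spec_common_keys
  intro data _ hpre
  unfold common_keys common_keys_alt
  simp only []
  set d := PySem.Dict.mk data with hd
  set companies := d.keys with hcomp
  have hcne : companies ≠ [] := by
    intro h
    apply hpre
    cases data with
    | nil => rfl
    | cons p ps => simp [hcomp, hd, PySem.Dict.keys] at h
  rw [PySem.List.slice_from_one]
  rw [PySem.List.foldl_append_if]
  simp only [List.nil_append]
  cases hcl : companies with
  | nil => exact absurd hcl hcne
  | cons c0 crest =>
    have hget0 : ∀ l : List String, PySem.List.pyGetD (c0 :: l) 0 "" = c0 := by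
      intro l; simp [pysem]
    cases hcr : crest with
    | nil =>
      -- single company: A's inner range is empty (loop returns false), B returns []
      subst hcr
      rw [hget0 []]
      simp [commonKeysLoopA]
    | cons r0 rtail =>
      subst hcr
      rw [hget0 (r0 :: rtail)]
      simp only [List.tail_cons]
      rw [List.map_id']
      refine List.filter_congr ?_
      intro a _
      have h1le : 1 ≤ (c0 :: r0 :: rtail).length := by simp
      have hA := commonKeysLoopA_eq d (c0 :: r0 :: rtail) a 1 h1le
      have hB := common_fold_contains d a rtail
        (PySem.Set.ofList (PySem.Dict.mk (d.getD r0 [])).keys)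
      simp only [List.drop_succ_cons, List.drop_zero, Nat.cast_one] at hA
      by_cases hall : ∀ c ∈ r0 :: rtail, (PySem.Dict.mk (d.getD c [])).contains a = true
      · have hAtrue : commonKeysLoopA d (c0 :: r0 :: rtail) ((c0 :: r0 :: rtail).length : Int) a
            (PySem.List.pyRange 1 ((c0 :: r0 :: rtail).length : Int) 1) = true := by
          rw [hA]
          exact ⟨by simp, hall⟩
        have hBtrue : (rtail.foldl
            (fun s c => PySem.Set.inter s (PySem.Set.ofList (PySem.Dict.mk (d.getD c [])).keys))
            (PySem.Set.ofList (PySem.Dict.mk (d.getD r0 [])).keys)).contains a = true := by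
          rw [hB]
          constructor
          · rw [PySem.Set.mem_ofList, ← PySem.Dict.contains_iff_mem_keys]
            exact hall r0 List.mem_cons_self
          · exact fun c hc => hall c (List.mem_cons_of_mem _ hc)
        rw [hAtrue, hBtrue]
      · have hAfalse : ¬ commonKeysLoopA d (c0 :: r0 :: rtail) ((c0 :: r0 :: rtail).length : Int) a
            (PySem.List.pyRange 1 ((c0 :: r0 :: rtail).length : Int) 1) = true := by
          rw [hA]
          rintro ⟨_, h⟩; exact hall h
        have hBfalse : ¬ (rtail.foldl
            (fun s c => PySem.Set.inter s (PySem.Set.ofList (PySem.Dict.mk (d.getD c [])).keys))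
            (PySem.Set.ofList (PySem.Dict.mk (d.getD r0 [])).keys)).contains a = true := by
          rw [hB]
          rintro ⟨hs, hrest⟩
          apply hall
          intro c hc
          rcases List.mem_cons.mp hc with h | h
          · subst h; rw [PySem.Dict.contains_iff_mem_keys]
            rw [PySem.Set.mem_ofList] at hs; exact hs
          · exact hrest c h
        simp only [Bool.not_eq_true] at hAfalse hBfalse
        rw [hAfalse, hBfalse]
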